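-- pv_equiv track=rewrite | github.com/LeaCara/exercise | exercise.py | separar_por_edad
-- ===== SOURCE A (Python) =====
-- def ordenar(lista_personas):
--     """ El metodo debe devolver una lista con las edades ordenadas de menor a mayor"""
--     # Completar
--     # pass
--     lista_ordenada = sorted(lista_personas, key=lambda x: x[3])
--     return lista_ordenada
--
-- def separar_por_edad(lista_personas):
--     """ Devolver dos listas
--     * lista 1: mayores de 25 (incluido)
--     * lista 2: menores de 25
--     """
--     # Completar
--     lista_ordenada = ordenar(lista_personas)
--     lista_menor_25 = []
--     lista_mayor_25 = []
--     for persona in lista_ordenada: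
--         if persona[3] < 25:
--             lista_menor_25.append(persona)
--         else:
--             lista_mayor_25.append(persona)
--     return lista_mayor_25, lista_menor_25
-- ===== SOURCE B (Python) =====
-- def separar_por_edad(lista_personas):
--     """ Devolver dos listas
--     * lista 1: mayores de 25 (incluido)
--     * lista 2: menores de 25
--     """
--     # Sort once by age; in the sorted list everyone under 25 forms a prefix,
--     # so find the first index with age >= 25 and split by slicing.
--     s = sorted(lista_personas, key=lambda x: x[3])
--     i = len(s)
--     for j, persona in enumerate(s):
--         if persona[3] >= 25:
--             i = j
--             break
--     return s[i:], s[:i]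
-- ===== Notes on version B (the rewrite author's own statement) =====
-- stated objective: alternative
-- what changed: B sorts once by age and then finds the first index with age >= 25, splitting by slicing at that point, instead of A's element-by-element append loop that builds the two lists; correct because in the sorted list all under-25 entries form a prefix.
import Mathlib
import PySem

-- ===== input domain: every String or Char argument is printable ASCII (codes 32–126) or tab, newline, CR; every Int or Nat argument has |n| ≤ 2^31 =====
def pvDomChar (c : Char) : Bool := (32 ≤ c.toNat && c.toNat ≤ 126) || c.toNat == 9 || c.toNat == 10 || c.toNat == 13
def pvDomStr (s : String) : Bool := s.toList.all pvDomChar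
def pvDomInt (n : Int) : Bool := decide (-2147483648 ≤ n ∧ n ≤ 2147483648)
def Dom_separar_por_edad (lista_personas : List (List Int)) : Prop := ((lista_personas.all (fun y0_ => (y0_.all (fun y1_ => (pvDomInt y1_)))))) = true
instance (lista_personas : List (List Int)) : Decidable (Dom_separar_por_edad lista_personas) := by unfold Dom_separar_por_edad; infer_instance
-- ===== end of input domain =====

-- B sorts once by age, then finds the first index with age >= 25 and splits by
-- slicing there, instead of A's append loop building both lists (objective: alternative).

-- key x[3]: exact on Pre_ (every persona has length ≥ 4); Python raises IndexError otherwise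
def pvKey3 (x : List Int) : Int := (PySem.List.pyGet? x 3).getD 0

-- ===== PORT A =====
def ordenar (lista_personas : List (List Int)) : List (List Int) :=
  PySem.List.sorted lista_personas pvKey3

def separar_por_edad (lista_personas : List (List Int)) : List (List Int) × List (List Int) :=
  let lista_ordenada := ordenar lista_personas
  let acc := lista_ordenada.foldl
    (fun (acc : List (List Int) × List (List Int)) persona =>
      if pvKey3 persona < 25 then (acc.1, acc.2 ++ [persona])
      else (acc.1 ++ [persona], acc.2))
    ([], [])
  (acc.1, acc.2)

-- ===== PORT B =====
-- the 'for j, persona in enumerate(s): if persona[3] >= 25: i = j; break' loop,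
-- with the default i = len(s) when no one is >= 25
def pvFirstGE : List (List Int) → Nat
  | [] => 0
  | x :: t => if 25 ≤ pvKey3 x then 0 else pvFirstGE t + 1

def separar_por_edad_alt (lista_personas : List (List Int)) : List (List Int) × List (List Int) :=
  let s := PySem.List.sorted lista_personas pvKey3
  let i : Int := (pvFirstGE s : Nat)
  (PySem.List.slice s (some i) none, PySem.List.slice s none (some i))

-- ===== PRECONDITION & SPEC =====
-- Pre_ excludes exactly the inputs where Python A raises IndexError (a persona shorter than 4, so persona[3] fails)
def Pre_separar_por_edad (lista_personas : List (List Int)) : Prop :=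
  ∀ p ∈ lista_personas, 4 ≤ p.length
instance (lista_personas : List (List Int)) : Decidable (Pre_separar_por_edad lista_personas) := by unfold Pre_separar_por_edad; infer_instance

def pvWitness_separar_por_edad : List (List Int) := [[1, 2, 3, 30], [4, 5, 6, 20], [7, 8, 9, 25]]

def Spec_separar_por_edad (lista_personas : List (List Int)) (out : List (List Int) × List (List Int)) : Prop := out = separar_por_edad_alt lista_personas
instance (lista_personas : List (List Int)) (out : List (List Int) × List (List Int)) : Decidable (Spec_separar_por_edad lista_personas out) := by unfold Spec_separar_por_edad; infer_instance

-- ===== CLAIM =====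
def Claim_equal_separar_por_edad : Prop := ∀ (lista_personas : List (List Int)), Dom_separar_por_edad lista_personas → Pre_separar_por_edad lista_personas → Spec_separar_por_edad lista_personas (separar_por_edad lista_personas)

-- ===== LEMMAS AND PROOFS =====

-- A's split loop returns the two filters of the traversed list
lemma pvSplitA (l : List (List Int)) :
    ∀ a b : List (List Int),
      l.foldl (fun (acc : List (List Int) × List (List Int)) persona =>
          if pvKey3 persona < 25 then (acc.1, acc.2 ++ [persona])
          else (acc.1 ++ [persona], acc.2)) (a, b) =
        (a ++ l.filter (fun x => !decide (pvKey3 x < 25)),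
         b ++ l.filter (fun x => decide (pvKey3 x < 25))) := by
  induction l with
  | nil => intro a b; simp
  | cons x l ih =>
    intro a b
    by_cases h : pvKey3 x < 25 <;>
      simp [h, ih]

-- on a list sorted by key, the two filters are the take/drop at the first index with key ≥ 25
lemma pvFilter_take_drop (s : List (List Int))
    (hs : s.Pairwise (fun a b => pvKey3 a ≤ pvKey3 b)) :
    s.filter (fun x => decide (pvKey3 x < 25)) = s.take (pvFirstGE s) ∧
    s.filter (fun x => !decide (pvKey3 x < 25)) = s.drop (pvFirstGE s) := by
  induction s with
  | nil => simp
  | cons x t ih =>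
    rw [List.pairwise_cons] at hs
    obtain ⟨hx, ht⟩ := hs
    by_cases h : 25 ≤ pvKey3 x
    · have hall : ∀ y ∈ x :: t, 25 ≤ pvKey3 y := by
        intro y hy
        rcases List.mem_cons.mp hy with rfl | hy
        · exact h
        · have := hx y hy; omega
      constructor
      · rw [pvFirstGE, if_pos h, List.take_zero, List.filter_eq_nil_iff]
        intro y hy
        have := hall y hy; simp; omega
      · rw [pvFirstGE, if_pos h, List.drop_zero, List.filter_eq_self]
        intro y hy
        have := hall y hy; simp; omega
    · obtain ⟨ih1, ih2⟩ := ih ht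
      rw [pvFirstGE, if_neg h]
      constructor
      · rw [List.filter_cons_of_pos (by simp; omega), List.take_succ_cons, ih1]
      · rw [List.filter_cons_of_neg (by simp; omega), List.drop_succ_cons, ih2]

-- ===== VERDICT =====
theorem separar_por_edad_spec : Claim_equal_separar_por_edad := by
  intro l _ _
  unfold Spec_separar_por_edad separar_por_edad separar_por_edad_alt ordenar
  obtain ⟨h1, h2⟩ := pvFilter_take_drop (PySem.List.sorted l pvKey3)
    (PySem.List.sorted_pairwise l pvKey3)
  simp only [pvSplitA, List.nil_append, PySem.List.slice_from_natCast,
    PySem.List.slice_to_natCast, h1, h2]
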